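-- pv_equiv track=rewrite | github.com/rebryant/wmc | benchmarks/generators/gen_product.py | weightString
-- ===== SOURCE A (Python) =====
-- def weightString(scaled, sigDigitCount):
--     wstring = ""
--     for i in range(sigDigitCount):
--         digit = scaled % 10
--         scaled = scaled // 10
--         wstring = str(digit) + wstring
--     wstring = str(scaled) + "." + wstring
--     return wstring
-- ===== SOURCE B (Python) =====
-- def weightString(scaled, sigDigitCount):
--     if sigDigitCount <= 0:
--         return str(scaled) + "."
--     intpart, frac = divmod(scaled, 10 ** sigDigitCount)
--     return str(intpart) + "." + str(frac).zfill(sigDigitCount)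
-- ===== Notes on version B (the rewrite author's own statement) =====
-- stated objective: faster
-- what changed: Replaces A's per-digit loop (repeated %10, //10 and string prepending) by a single divmod with 10**sigDigitCount and str(frac).zfill(sigDigitCount), guarding the degenerate sigDigitCount <= 0 case up front.
import Mathlib
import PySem

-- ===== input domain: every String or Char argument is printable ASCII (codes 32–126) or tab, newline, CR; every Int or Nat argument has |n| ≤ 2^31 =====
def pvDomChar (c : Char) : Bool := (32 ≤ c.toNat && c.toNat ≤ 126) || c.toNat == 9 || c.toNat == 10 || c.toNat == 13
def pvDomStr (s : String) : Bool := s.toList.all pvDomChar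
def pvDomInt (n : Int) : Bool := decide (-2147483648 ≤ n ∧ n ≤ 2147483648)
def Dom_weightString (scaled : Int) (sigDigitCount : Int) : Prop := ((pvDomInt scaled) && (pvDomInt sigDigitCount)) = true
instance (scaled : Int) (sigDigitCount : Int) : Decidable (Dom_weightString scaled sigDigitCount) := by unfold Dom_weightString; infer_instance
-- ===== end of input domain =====

-- B replaces A's per-digit loop by one divmod with 10**sigDigitCount plus str(frac).zfill(sigDigitCount) (objective: faster — one divmod replaces the quadratic prepend loop).

-- ===== PORT A =====
def weightString (scaled : Int) (sigDigitCount : Int) : String :=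
  -- for i in range(sigDigitCount): digit = scaled % 10; scaled = scaled // 10; wstring = str(digit) + wstring
  let st := (PySem.List.pyRange 0 sigDigitCount 1).foldl
      (fun (st : Int × String) _ =>
        let digit := PySem.Int.mod st.1 10
        (PySem.Int.floordiv st.1 10, PySem.Int.toStr digit ++ st.2))
      (scaled, "")
  PySem.Int.toStr st.1 ++ "." ++ st.2

-- ===== PORT B =====
def weightString_alt (scaled : Int) (sigDigitCount : Int) : String :=
  if sigDigitCount ≤ 0 then
    PySem.Int.toStr scaled ++ "."
  else
    -- 10 ** sigDigitCount (the exponent is > 0 here, so this is the integer power)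
    let p : Int := 10 ^ sigDigitCount.toNat
    -- intpart, frac = divmod(scaled, p); p ≠ 0, so divmod returns (scaled // p, scaled % p)
    let intpart := PySem.Int.floordiv scaled p
    let frac := PySem.Int.mod scaled p
    PySem.Int.toStr intpart ++ "." ++ PySem.Str.zfill (PySem.Int.toStr frac) sigDigitCount

-- ===== PRECONDITION & SPEC =====
def Spec_weightString (scaled : Int) (sigDigitCount : Int) (out : String) : Prop := out = weightString_alt scaled sigDigitCount
instance (scaled : Int) (sigDigitCount : Int) (out : String) : Decidable (Spec_weightString scaled sigDigitCount out) := by unfold Spec_weightString; infer_instance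

-- ===== CLAIM (what is proved, stated in full; the proofs are below) =====
def Claim_equal_weightString : Prop := ∀ (scaled : Int) (sigDigitCount : Int), Dom_weightString scaled sigDigitCount → Spec_weightString scaled sigDigitCount (weightString scaled sigDigitCount)

-- ===== LEMMAS AND PROOFS =====

-- decimal digit characters of m, most significant first (= Nat.toDigits 10 m)
def pvD (m : Nat) : List Char :=
  if m < 10 then [Nat.digitChar m]
  else pvD (m / 10) ++ [Nat.digitChar (m % 10)]
decreasing_by exact Nat.div_lt_self (by omega) (by omega)

lemma pvD_toDigitsCore (f : Nat) : ∀ (m : Nat) (acc : List Char), m < f →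
    Nat.toDigitsCore 10 f m acc = pvD m ++ acc := by
  induction f with
  | zero => intro m acc h; omega
  | succ f ih =>
    intro m acc h
    rw [Nat.toDigitsCore]
    by_cases h10 : m < 10
    · have hz : m / 10 = 0 := Nat.div_eq_of_lt h10
      conv_rhs => rw [pvD]
      simp [hz, h10, Nat.mod_eq_of_lt h10]
    · have hne : ¬ (m / 10 = 0) := by
        intro hz; exact h10 (by omega)
      have hlt : m / 10 < f := by
        have := Nat.div_lt_self (n := m) (k := 10) (by omega) (by omega)
        omega
      rw [if_neg hne, ih _ _ hlt]
      conv_rhs => rw [pvD]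
      rw [if_neg h10, List.append_assoc]
      rfl

lemma toChars_eq_pvD (s : Int) (h : 0 ≤ s) : PySem.Int.toChars s = pvD s.toNat := by
  unfold PySem.Int.toChars
  rw [if_neg (by omega)]
  unfold Nat.toDigits
  rw [pvD_toDigitsCore _ _ _ (Nat.lt_succ_self _), List.append_nil]

lemma pv_digitChar_no_sign : ∀ k < 10, Nat.digitChar k ≠ '+' ∧ Nat.digitChar k ≠ '-' := by decide

lemma pvD_no_sign (m : Nat) : ∀ c ∈ pvD m, c ≠ '+' ∧ c ≠ '-' := by
  induction m using Nat.strong_induction_on with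
  | _ m ih =>
    intro c hc
    rw [pvD] at hc
    by_cases h10 : m < 10
    · rw [if_pos h10] at hc
      simp at hc
      subst hc
      exact pv_digitChar_no_sign m h10
    · rw [if_neg h10] at hc
      rcases List.mem_append.mp hc with h1 | h2
      · exact ih (m / 10) (Nat.div_lt_self (by omega) (by omega)) c h1
      · simp at h2
        subst h2
        exact pv_digitChar_no_sign _ (Nat.mod_lt _ (by omega))

lemma pvD_ne_nil (m : Nat) : pvD m ≠ [] := by
  by_cases h : m < 10
  · rw [pvD, if_pos h]; simp
  · rw [pvD, if_neg h]; simp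

lemma pvD_length_le (k : Nat) : ∀ m, 1 ≤ k → m < 10 ^ k → (pvD m).length ≤ k := by
  induction k with
  | zero => intro m h; omega
  | succ k ih =>
    intro m _ hm
    by_cases h10 : m < 10
    · rw [pvD, if_pos h10]; simp
    · have hk : 1 ≤ k := by
        rcases k with _ | k
        · norm_num at hm; omega
        · omega
      have hdiv : m / 10 < 10 ^ k := by
        rw [Nat.div_lt_iff_lt_mul (by omega)]
        calc m < 10 ^ (k + 1) := hm
          _ = 10 ^ k * 10 := by ring
      rw [pvD, if_neg h10]
      have := ih _ hk hdiv
      simp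
      omega

-- the k least-significant decimal digits of m, most significant first (what A's loop builds)
def pvGN : Nat → Nat → List Char
  | 0, _ => []
  | k + 1, m => pvGN k (m / 10) ++ [Nat.digitChar (m % 10)]

lemma pvGN_zero (k : Nat) : pvGN k 0 = List.replicate k '0' := by
  induction k with
  | zero => rfl
  | succ k ih =>
    rw [pvGN, ih, List.replicate_succ']
    rfl

lemma pvGN_pad : ∀ (k m : Nat), 1 ≤ k → m < 10 ^ k →
    pvGN k m = List.replicate (k - (pvD m).length) '0' ++ pvD m := by
  intro k
  induction k with
  | zero => intro m h; omega
  | succ k ih =>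
    intro m _ hm
    by_cases h10 : m < 10
    · have hdiv : m / 10 = 0 := Nat.div_eq_of_lt h10
      rw [pvGN, hdiv, pvGN_zero, pvD, if_pos h10, Nat.mod_eq_of_lt h10]
      simp
    · have hk : 1 ≤ k := by
        rcases k with _ | k
        · norm_num at hm; omega
        · omega
      have hdiv : m / 10 < 10 ^ k := by
        rw [Nat.div_lt_iff_lt_mul (by omega)]
        calc m < 10 ^ (k + 1) := hm
          _ = 10 ^ k * 10 := by ring
      conv_rhs => rw [pvD, if_neg h10]
      rw [pvGN, ih _ hk hdiv, List.append_assoc]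
      have hl : (pvD (m / 10) ++ [Nat.digitChar (m % 10)]).length
          = (pvD (m / 10)).length + 1 := by simp
      rw [hl]
      have : k + 1 - ((pvD (m / 10)).length + 1) = k - (pvD (m / 10)).length := by omega
      rw [this]

-- zfill of a digit string (no sign) is plain left-padding with '0'
lemma pvZfill (k m : Nat) (hk : 1 ≤ k) (hm : m < 10 ^ k) :
    PySem.Chars.zfill (pvD m) (k : Int) = List.replicate (k - (pvD m).length) '0' ++ pvD m := by
  have hL : (pvD m).length ≤ k := pvD_length_le k m hk hm
  unfold PySem.Chars.zfill
  by_cases hle : (k : Int) ≤ ((pvD m).length : Int)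
  · rw [if_pos hle]
    have heq : (pvD m).length = k := by omega
    rw [heq]
    simp
  · rw [if_neg hle]
    obtain ⟨c, rest, hcr⟩ : ∃ c rest, pvD m = c :: rest := by
      cases h : pvD m with
      | nil => exact absurd h (pvD_ne_nil m)
      | cons c r => exact ⟨c, r, rfl⟩
    have hsign : ¬ (c = '+' ∨ c = '-') := by
      have := pvD_no_sign m c (by rw [hcr]; exact List.mem_cons_self)
      tauto
    rw [hcr]
    simp only [hsign, if_false]
    rw [← hcr, Int.toNat_natCast]

-- one iteration of A's loop body
def pvStep (st : Int × String) : Int × String :=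
  (PySem.Int.floordiv st.1 10, PySem.Int.toStr (PySem.Int.mod st.1 10) ++ st.2)

lemma pv_shift (s P : Int) (hP : 0 < P) : (s / 10) % P = (s % (10 * P)) / 10 := by
  have h1 : 10 * P * (s / (10 * P)) + s % (10 * P) = s := Int.mul_ediv_add_emod s (10 * P)
  set q := s / (10 * P) with hq
  set r := s % (10 * P) with hr
  have hr0 : 0 ≤ r := Int.emod_nonneg s (by positivity)
  have hr1 : r < 10 * P := Int.emod_lt_of_pos s (by positivity)
  have hs : s = r + (P * q) * 10 := by rw [← h1]; ring
  rw [hs, Int.add_mul_ediv_right _ _ (by norm_num : (10:Int) ≠ 0),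
    Int.add_mul_emod_self_left]
  have hlt : r / 10 < P := by
    apply Int.ediv_lt_of_lt_mul (by norm_num)
    linarith
  have hge : 0 ≤ r / 10 := Int.ediv_nonneg hr0 (by norm_num)
  exact Int.emod_eq_of_lt hge hlt

lemma pvStep_iter (k : Nat) : ∀ (s : Int) (w : String),
    pvStep^[k] (s, w) = (PySem.Int.floordiv s (10 ^ k),
      String.ofList (pvGN k (PySem.Int.mod s (10 ^ k)).toNat ++ w.toList)) := by
  induction k with
  | zero =>
    intro s w
    simp [pvGN, PySem.Int.floordiv]
  | succ k ih =>
    intro s w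
    rw [Function.iterate_succ_apply]
    show pvStep^[k] (PySem.Int.floordiv s 10, PySem.Int.toStr (PySem.Int.mod s 10) ++ w) = _
    rw [ih]
    have hP : (0:Int) < 10 ^ k := by positivity
    have hP1 : (0:Int) < 10 ^ (k + 1) := by positivity
    have hpow : (10:Int) ^ (k + 1) = 10 * 10 ^ k := by ring
    have hr0 : 0 ≤ PySem.Int.mod s (10 ^ (k + 1)) := by
      rw [PySem.Int.mod_eq_emod_of_pos hP1]
      exact Int.emod_nonneg s (by positivity)
    rw [Prod.mk.injEq]
    refine ⟨?_, ?_⟩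
    · -- integer part: (s // 10) // 10^k = s // 10^(k+1)
      show PySem.Int.floordiv (PySem.Int.floordiv s 10) (10 ^ k) = PySem.Int.floordiv s (10 ^ (k + 1))
      rw [PySem.Int.floordiv_eq_ediv_of_pos hP, PySem.Int.floordiv_eq_ediv_of_pos (by norm_num),
        PySem.Int.floordiv_eq_ediv_of_pos hP1, Int.ediv_ediv_of_nonneg (by norm_num), hpow,
        mul_comm]
    · -- digit string
      show String.ofList (pvGN k (PySem.Int.mod (PySem.Int.floordiv s 10) (10 ^ k)).toNat ++
          (PySem.Int.toStr (PySem.Int.mod s 10) ++ w).toList) = _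
      congr 1
      have hA : PySem.Int.mod (PySem.Int.floordiv s 10) (10 ^ k)
          = (PySem.Int.mod s (10 ^ (k + 1))) / 10 := by
        rw [PySem.Int.mod_eq_emod_of_pos hP, PySem.Int.floordiv_eq_ediv_of_pos (by norm_num),
          PySem.Int.mod_eq_emod_of_pos hP1, hpow]
        exact pv_shift s _ hP
      have hB : PySem.Int.mod s 10 = (PySem.Int.mod s (10 ^ (k + 1))) % 10 := by
        rw [PySem.Int.mod_eq_emod_of_pos (by norm_num), PySem.Int.mod_eq_emod_of_pos hP1]
        exact (Int.emod_emod_of_dvd s ⟨10 ^ k, hpow⟩).symm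
      set r := PySem.Int.mod s (10 ^ (k + 1)) with hrdef
      have hA' : ((r : Int) / 10).toNat = r.toNat / 10 := by omega
      have hBlt : 0 ≤ r % 10 ∧ r % 10 < 10 := ⟨Int.emod_nonneg r (by norm_num), Int.emod_lt_of_pos r (by norm_num)⟩
      have hB' : (r % 10).toNat = r.toNat % 10 := by omega
      rw [hA, hA', hB, String.toList_append, PySem.Int.toList_toStr,
        toChars_eq_pvD _ hBlt.1, hB']
      have hpvd : pvD (r.toNat % 10) = [Nat.digitChar (r.toNat % 10)] := by
        rw [pvD, if_pos (Nat.mod_lt _ (by omega))]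
      rw [hpvd]
      show pvGN k (r.toNat / 10) ++ ([Nat.digitChar (r.toNat % 10)] ++ w.toList)
          = pvGN (k + 1) r.toNat ++ w.toList
      rw [pvGN, List.append_assoc]

lemma foldl_const_iterate {α σ : Type} (l : List α) (f : σ → σ) (init : σ) :
    l.foldl (fun s _ => f s) init = f^[l.length] init := by
  induction l generalizing init with
  | nil => rfl
  | cons x t ih => simp [ih, Function.iterate_succ_apply]

theorem weightString_spec : Claim_equal_weightString := by
  intro scaled sig _
  unfold Spec_weightString weightString weightString_alt
  by_cases hneg : sig ≤ 0
  · rw [if_pos hneg, PySem.List.pyRange_one_eq_nil hneg]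
    simp
  · rw [if_neg hneg]
    rw [not_le] at hneg
    set n := sig.toNat with hn
    have hn1 : 1 ≤ n := by omega
    have hfun : (fun (st : Int × String) (_ : Int) =>
        let digit := PySem.Int.mod st.1 10
        (PySem.Int.floordiv st.1 10, PySem.Int.toStr digit ++ st.2))
        = fun st _ => pvStep st := rfl
    rw [hfun, foldl_const_iterate, PySem.List.length_pyRange_one]
    have hlen : (sig - 0).toNat = n := by omega
    rw [hlen, pvStep_iter]
    have hP : (0:Int) < 10 ^ n := by positivity
    have hfr0 : 0 ≤ PySem.Int.mod scaled (10 ^ n) := by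
      rw [PySem.Int.mod_eq_emod_of_pos hP]
      exact Int.emod_nonneg scaled (by positivity)
    have hfrlt : PySem.Int.mod scaled (10 ^ n) < 10 ^ n := by
      rw [PySem.Int.mod_eq_emod_of_pos hP]
      exact Int.emod_lt_of_pos scaled hP
    set frac := PySem.Int.mod scaled (10 ^ n) with hfrac
    have hm : frac.toNat < 10 ^ n := by
      have : ((10:Int) ^ n) = ((10 ^ n : Nat) : Int) := by push_cast; ring
      omega
    show PySem.Int.toStr (PySem.Int.floordiv scaled (10 ^ n)) ++ "." ++
        String.ofList (pvGN n frac.toNat ++ ("".toList))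
      = PySem.Int.toStr (PySem.Int.floordiv scaled (10 ^ n)) ++ "." ++
        PySem.Str.zfill (PySem.Int.toStr frac) sig
    congr 1
    -- fractional strings agree
    have hzf : (PySem.Str.zfill (PySem.Int.toStr frac) sig).toList
        = pvGN n frac.toNat ++ ("".toList) := by
      rw [PySem.Str.toList_zfill, PySem.Int.toList_toStr, toChars_eq_pvD _ hfr0]
      have hsig : (sig : Int) = (n : Int) := by omega
      rw [hsig, pvZfill n frac.toNat hn1 hm, pvGN_pad n frac.toNat hn1 hm]
      simp
    calc String.ofList (pvGN n frac.toNat ++ ("".toList))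
        = String.ofList ((PySem.Str.zfill (PySem.Int.toStr frac) sig).toList) := by rw [hzf]
      _ = PySem.Str.zfill (PySem.Int.toStr frac) sig := String.ofList_toList
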